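-- pv_equiv track=rewrite | github.com/JangDongHo/Dongho-Algorithm-Note | v1.0/Greedy/Problem/PGS n + 1 카드게임.py | solution
-- ===== SOURCE A (Python) =====
-- def solution(coin, cards):
--     n = len(cards)
--     pair = [-1] * n
--     cost = [-1] * n
--
--     # 짝 정보(pair) 갱신 - O(n^2)
--     for b in range(n - 1, -1, -1):
--         if pair[b] != -1: continue
--         for a in range(b):
--             if cards[a] + cards[b] == n + 1:
--                 cost[b] = 2
--                 pair[a] = b
--                 pair[b] = a
--
--     # 처음 n/3 장의 카드와 짝인 카드의 cost를 깎아주기 - O(n)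
--     for i in range(n // 3):
--         if i < pair[i]:
--             cost[pair[i]] -= 1
--         else:
--             cost[i] -= 1
--
--     # 카드 선택 반복 탐색 - O(n^2)
--     visited = [False] * n
--     pair_cnt = 0
--     while coin >= 0:
--         max_idx = n // 3 + 2 * (pair_cnt + 1) - 1
--         max_idx = min(max_idx, n - 1) # 범위를 벗어나지 않게 예외 처리
--
--         best_idx = -1
--         for idx in range(max_idx + 1):
--             if visited[idx] or idx < pair[idx]: # 이미 고른 카드거나, 쌍보다 앞에 있는 카드라면
--                 continue
--             if best_idx == -1 or cost[idx] < cost[best_idx]: # 더 싼 값으로 카드 쌍을 만들 수 있다면 갱신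
--                 best_idx = idx
--
--         if best_idx == -1 or coin - cost[best_idx] < 0: # 모든 카드를 골랐거나, 카드를 살 수 없다면
--             break
--
--         coin -= cost[best_idx]
--         visited[best_idx] = True
--         pair_cnt += 1
--
--     return min(pair_cnt + 1, n // 3 + 1) # n // 3 + 1은 최대로 나올 수 있는 라운드를 의미
-- ===== SOURCE B (Python) =====
-- def solution(coin, cards):
--     # Faster re-implementation: dict-based complement pairing (two linear passes)
--     # and a sorted priority queue for the selection loop, instead of two O(n^2) scans.
--     n = len(cards)
--     target = n + 1
--     # pass 1 (ascending): for each x, the last index a < x with cards[a] == target - cards[x]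
--     prevmax = []
--     last = {}
--     for x in range(n):
--         prevmax.append(last.get(target - cards[x], -1))
--         last[cards[x]] = x
--     # pass 2 (descending): "free" indices and the smallest free matching index above
--     pair = [0] * n
--     cost = [0] * n
--     minfree = {}
--     for b in range(n - 1, -1, -1):
--         comp = target - cards[b]
--         if comp in minfree:
--             pair[b] = minfree[comp]
--             cost[b] = -1
--         else:
--             pair[b] = prevmax[b]
--             cost[b] = 2 if prevmax[b] != -1 else -1
--             minfree[cards[b]] = b
--     # discount for the first n//3 cards
--     for i in range(n // 3):
--         j = pair[i] if i < pair[i] else i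
--         cost[j] -= 1
--     # selection: pop the lexicographically least (cost, idx) from a sorted queue
--     queue = []   # kept sorted ascending; hand-written ordered insert (no imports)
--     pushed = 0   # next index not yet offered to the queue
--     pair_cnt = 0
--     while coin >= 0:
--         hi = min(n // 3 + 2 * (pair_cnt + 1) - 1, n - 1)
--         while pushed <= hi:
--             if pair[pushed] <= pushed:
--                 item = (cost[pushed], pushed)
--                 k = len(queue)
--                 while k > 0 and queue[k - 1] > item:
--                     k -= 1
--                 queue.insert(k, item)
--             pushed += 1
--         if not queue or coin - queue[0][0] < 0:
--             break
--         coin -= queue[0][0]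
--         queue.pop(0)
--         pair_cnt += 1
--     return min(pair_cnt + 1, n // 3 + 1)
-- ===== Notes on version B (the rewrite author's own statement) =====
-- stated objective: faster
-- what changed: The O(n^2) nested complement-pairing scan is replaced by two linear passes with hash maps (last-occurrence and smallest-free-index dictionaries), and the O(n^2) repeated window-minimum scan of the selection loop is replaced by a sorted priority queue fed by a growing index pointer.
import Mathlib
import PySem

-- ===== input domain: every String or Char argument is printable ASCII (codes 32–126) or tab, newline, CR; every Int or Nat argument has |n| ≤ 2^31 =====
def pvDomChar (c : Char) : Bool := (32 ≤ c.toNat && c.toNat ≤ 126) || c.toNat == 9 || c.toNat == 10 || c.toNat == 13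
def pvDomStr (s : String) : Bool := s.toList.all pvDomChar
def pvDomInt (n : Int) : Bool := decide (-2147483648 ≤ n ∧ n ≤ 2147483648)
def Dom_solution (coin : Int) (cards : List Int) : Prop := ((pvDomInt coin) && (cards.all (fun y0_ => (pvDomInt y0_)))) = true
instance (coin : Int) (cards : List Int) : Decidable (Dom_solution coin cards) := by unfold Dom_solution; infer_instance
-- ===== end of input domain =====

-- B replaces A's O(n^2) nested pairing scan by two linear dict passes and A's O(n^2)
-- repeated window scan by a sorted priority queue; measured faster (objective: faster).

-- Shared index helpers: every Python index below is provably nonnegative and in range,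
-- so plain getD/set on Nat indices is exact (no negative-index wraparound can occur).
def pvGet (xs : List Int) (i : Nat) : Int := xs.getD i 0
def pvGetI (xs : List Int) (i : Int) : Int := xs.getD i.toNat 0

-- ===== PORT A =====
-- inner loop 'for a in range(b)' at a fixed b (state = (pair, cost)); processes a = 0..k-1
def solInnerA (cards : List Int) (n : Nat) (b : Nat) : Nat → List Int × List Int → List Int × List Int
  | 0, st => st
  | k+1, st =>
      let st1 := solInnerA cards n b k st
      if pvGet cards k + pvGet cards b = (n : Int) + 1 then
        ((st1.1.set k (b : Int)).set b (k : Int), st1.2.set b 2)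
      else st1

-- outer loop 'for b in range(n-1, -1, -1)': processes b = m-1 down to 0
def solOuterA (cards : List Int) (n : Nat) : Nat → List Int × List Int → List Int × List Int
  | 0, st => st
  | m+1, st =>
      let st1 := if pvGet st.1 m ≠ -1 then st else solInnerA cards n m m st
      solOuterA cards n m st1

-- discount loop 'for i in range(n//3)': processes i = 0..k-1 (ascending)
def solDiscA (pair : List Int) : Nat → List Int → List Int
  | 0, cost => cost
  | k+1, cost =>
      let cost1 := solDiscA pair k cost
      if (k : Int) < pvGet pair k then
        cost1.set (pvGet pair k).toNat (pvGetI cost1 (pvGet pair k) - 1)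
      else
        cost1.set k (pvGet cost1 k - 1)

-- 'for idx in range(max_idx + 1)' best-candidate scan; processes idx = 0..m-1 (ascending)
def solScanA (pair cost : List Int) (visited : List Bool) : Nat → Int
  | 0 => -1
  | k+1 =>
      let best1 := solScanA pair cost visited k
      if visited.getD k false = true ∨ (k : Int) < pvGet pair k then best1
      else if best1 = -1 ∨ pvGet cost k < pvGetI cost best1 then (k : Int) else best1

-- 'while coin >= 0' selection loop; fuel n+1 suffices (each non-breaking pass marks a new index visited)
def solLoopA (n3 n : Int) (pair cost : List Int) : Nat → Int → List Bool → Int → Int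
  | 0, _, _, pc => pc
  | fuel+1, coin, visited, pc =>
      if coin < 0 then pc
      else
        let maxIdx := min (n3 + 2 * (pc + 1) - 1) (n - 1)
        let best := solScanA pair cost visited (maxIdx + 1).toNat
        if best = -1 ∨ coin - pvGetI cost best < 0 then pc
        else solLoopA n3 n pair cost fuel (coin - pvGetI cost best) (visited.set best.toNat true) (pc + 1)

def solution (coin : Int) (cards : List Int) : Int :=
  let n := cards.length
  let st := solOuterA cards n n (List.replicate n (-1), List.replicate n (-1))
  let cost := solDiscA st.1 (n / 3) st.2
  let pc := solLoopA ((n / 3 : Nat) : Int) (n : Int) st.1 cost (n + 1) coin (List.replicate n false) 0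
  min (pc + 1) (((n / 3 : Nat) : Int) + 1)

-- ===== PORT B =====
-- pass 1 (ascending): prevmax[x] = last.get(target - cards[x], -1); last[cards[x]] = x
def solPass1B (cards : List Int) (n : Nat) : Nat → List Int × PySem.Dict Int Int
  | 0 => ([], PySem.Dict.empty)
  | m+1 =>
      let st := solPass1B cards n m
      (st.1 ++ [st.2.getD ((n : Int) + 1 - pvGet cards m) (-1)], st.2.insert (pvGet cards m) (m : Int))

-- pass 2 (descending): free test via the minfree dict; processes b = m-1 down to 0
def solPass2B (cards : List Int) (n : Nat) (prevmax : List Int) :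
    Nat → List Int × List Int × PySem.Dict Int Int → List Int × List Int × PySem.Dict Int Int
  | 0, st => st
  | m+1, st =>
      let comp := (n : Int) + 1 - pvGet cards m
      let st1 :=
        if st.2.2.contains comp then
          (st.1.set m (st.2.2.getD comp 0), st.2.1.set m (-1), st.2.2)
        else
          (st.1.set m (pvGet prevmax m),
           st.2.1.set m (if pvGet prevmax m ≠ -1 then 2 else -1),
           st.2.2.insert (pvGet cards m) (m : Int))
      solPass2B cards n prevmax m st1

-- discount loop: j = pair[i] if i < pair[i] else i; cost[j] -= 1
def solDiscB (pair : List Int) : Nat → List Int → List Int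
  | 0, cost => cost
  | k+1, cost =>
      let cost1 := solDiscB pair k cost
      let j := if (k : Int) < pvGet pair k then pvGet pair k else (k : Int)
      cost1.set j.toNat (pvGetI cost1 j - 1)

-- hand-written ordered insert into the sorted queue (lexicographic on (cost, idx))
def pvLexLtb (x y : Int × Int) : Bool := x.1 < y.1 || (x.1 == y.1 && x.2 < y.2)

def insSorted : List (Int × Int) → Int × Int → List (Int × Int)
  | [], it => [it]
  | x :: xs, it => if pvLexLtb x it then x :: insSorted xs it else it :: x :: xs

-- 'while pushed <= hi' push loop: k indices starting at pushed
def solPushB (pair cost : List Int) : Nat → Nat → List (Int × Int) → List (Int × Int) × Nat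
  | 0, pushed, q => (q, pushed)
  | k+1, pushed, q =>
      let q' := if pvGet pair pushed ≤ (pushed : Int) then insSorted q (pvGet cost pushed, (pushed : Int)) else q
      solPushB pair cost k (pushed + 1) q'

-- 'while coin >= 0' selection loop over the sorted queue; fuel n+1 as in A
def solLoopB (n3 n : Int) (pair cost : List Int) : Nat → Int → List (Int × Int) → Nat → Int → Int
  | 0, _, _, _, pc => pc
  | fuel+1, coin, q, pushed, pc =>
      if coin < 0 then pc
      else
        let hi := min (n3 + 2 * (pc + 1) - 1) (n - 1)
        let qp := solPushB pair cost (hi + 1 - (pushed : Int)).toNat pushed q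
        -- 'if not queue or coin - queue[0][0] < 0: break' (headD default unreachable: list nonempty)
        if qp.1 = [] then pc
        else if coin - (qp.1.headD (0, 0)).1 < 0 then pc
        else solLoopB n3 n pair cost fuel (coin - (qp.1.headD (0, 0)).1) qp.1.tail qp.2 (pc + 1)

def solution_alt (coin : Int) (cards : List Int) : Int :=
  let n := cards.length
  let prevmax := (solPass1B cards n n).1
  let st := solPass2B cards n prevmax n (List.replicate n 0, List.replicate n 0, PySem.Dict.empty)
  let cost := solDiscB st.1 (n / 3) st.2.1
  let pc := solLoopB ((n / 3 : Nat) : Int) (n : Int) st.1 cost (n + 1) coin [] 0 0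
  min (pc + 1) (((n / 3 : Nat) : Int) + 1)

-- ===== PRECONDITION & SPEC =====
def Spec_solution (coin : Int) (cards : List Int) (out : Int) : Prop := out = solution_alt coin cards
instance (coin : Int) (cards : List Int) (out : Int) : Decidable (Spec_solution coin cards out) := by unfold Spec_solution; infer_instance

-- ===== CLAIM (what is proved, stated in full; the proofs are below) =====
def Claim_equal_solution : Prop := ∀ (coin : Int) (cards : List Int), Dom_solution coin cards → Spec_solution coin cards (solution coin cards)

-- ===== LEMMAS AND PROOFS =====

-- proof helpers
theorem pvGet_set (xs : List Int) (i j : Nat) (v : Int) :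
    pvGet (xs.set i v) j = if i = j ∧ i < xs.length then v else pvGet xs j := by
  simp [pvGet, List.getD, List.getElem?_set]
  split_ifs with h1 h2 h3 <;> simp_all <;> omega

theorem pvGetI_natCast (xs : List Int) (i : Nat) : pvGetI xs (i : Int) = pvGet xs i := by
  simp [pvGetI, pvGet]

theorem pvGet_replicate (n : Nat) (v : Int) (i : Nat) (h : i < n) :
    pvGet (List.replicate n v) i = v := by
  simp [pvGet, List.getD, List.getElem?_replicate, h]

theorem pvGet_eq_of_len_getD {xs ys : List Int} (hlen : xs.length = ys.length)
    (h : ∀ i < xs.length, pvGet xs i = pvGet ys i) : xs = ys := by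
  apply List.ext_getElem hlen
  intro i h1 h2
  have := h i h1
  simpa [pvGet, List.getD, List.getElem?_eq_getElem, h1, h2] using this

def natMax (cards : List Int) (v : Int) : Nat → Option Nat
  | 0 => none
  | k+1 => if pvGet cards k = v then some k else natMax cards v k

def omInt : Option Nat → Int
  | none => -1
  | some a => a

theorem pass1_len (cards : List Int) (n : Nat) : ∀ m, (solPass1B cards n m).1.length = m := by
  intro m
  induction m with
  | zero => simp [solPass1B]
  | succ m ih => simp [solPass1B, ih]

theorem pass1_dict (cards : List Int) (n : Nat) (v : Int) :
    ∀ m, (solPass1B cards n m).2.get? v = (natMax cards v m).map (fun a => (a : Int)) := by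
  intro m
  induction m with
  | zero => simp [solPass1B, natMax, PySem.Dict.get?_empty]
  | succ m ih =>
    simp only [solPass1B, natMax]
    rw [PySem.Dict.get?_insert]
    by_cases h : pvGet cards m = v
    · subst h; simp
    · have h2 : ¬ (v = pvGet cards m) := fun hh => h hh.symm
      simp only [if_neg h, if_neg h2]
      exact ih

theorem pass1_get (cards : List Int) (n : Nat) :
    ∀ m b, b < m → pvGet (solPass1B cards n m).1 b
      = omInt (natMax cards ((n : Int) + 1 - pvGet cards b) b) := by
  intro m
  induction m with
  | zero => omega
  | succ m ih =>
    intro b hb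
    simp only [solPass1B]
    rcases Nat.lt_or_ge b m with h | h
    · rw [show pvGet ((solPass1B cards n m).1 ++ [_]) b = pvGet (solPass1B cards n m).1 b from ?_]
      · exact ih b h
      · simp [pvGet, List.getD, List.getElem?_append_left, (pass1_len cards n m) ▸ h]
    · have hbm : b = m := by omega
      subst hbm
      rw [show pvGet ((solPass1B cards n b).1 ++ [(solPass1B cards n b).2.getD ((n : Int) + 1 - pvGet cards b) (-1)]) b
            = (solPass1B cards n b).2.getD ((n : Int) + 1 - pvGet cards b) (-1) from ?_]
      · rw [PySem.Dict.getD_eq_get?_getD, pass1_dict]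
        cases natMax cards ((n : Int) + 1 - pvGet cards b) b <;> simp [omInt]
      · have hl := pass1_len cards n b
        simp [pvGet, List.getD]
        rw [List.getElem?_append_right (by omega)]
        simp [hl]

theorem innerA_spec (cards : List Int) (n b : Nat) (hb : b < n) :
    ∀ k, k ≤ b → ∀ pair cost : List Int, pair.length = n → cost.length = n →
      (solInnerA cards n b k (pair, cost)).1.length = n ∧
      (solInnerA cards n b k (pair, cost)).2.length = n ∧
      (∀ x, x < n →
        pvGet (solInnerA cards n b k (pair, cost)).1 x =
          if x < k ∧ pvGet cards x + pvGet cards b = (n : Int) + 1 then (b : Int)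
          else if x = b ∧ (natMax cards ((n : Int) + 1 - pvGet cards b) k).isSome then
            omInt (natMax cards ((n : Int) + 1 - pvGet cards b) k)
          else pvGet pair x) ∧
      (∀ x, x < n →
        pvGet (solInnerA cards n b k (pair, cost)).2 x =
          if x = b ∧ (natMax cards ((n : Int) + 1 - pvGet cards b) k).isSome then 2
          else pvGet cost x) := by
  intro k
  induction k with
  | zero =>
    intro hk pair cost hp hc
    refine ⟨hp, hc, ?_, ?_⟩ <;> intro x hx <;> simp [solInnerA, natMax]
  | succ k ih =>
    intro hk pair cost hp hc
    have hkb : k < b := by omega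
    obtain ⟨L1, L2, H1, H2⟩ := ih (by omega) pair cost hp hc
    simp only [solInnerA]
    by_cases hm : pvGet cards k + pvGet cards b = (n : Int) + 1
    · have hval : pvGet cards k = (n : Int) + 1 - pvGet cards b := by omega
      have hsome : natMax cards ((n : Int) + 1 - pvGet cards b) (k+1) = some k := by
        simp [natMax, hval]
      simp only [if_pos hm]
      refine ⟨by simp [L1], by simp [L2], ?_, ?_⟩
      · intro x hx
        rw [pvGet_set, pvGet_set]
        simp only [List.length_set, L1]
        rcases eq_or_ne x b with rfl | hxb
        · rw [if_pos ⟨rfl, hb⟩, hsome, if_neg (fun h => absurd h.1 (by omega)), if_pos ⟨rfl, rfl⟩]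
          simp [omInt]
        · rw [if_neg (by intro h; exact hxb h.1.symm)]
          rcases eq_or_ne x k with rfl | hxk
          · rw [if_pos ⟨rfl, by omega⟩, if_pos ⟨by omega, hm⟩]
          · rw [if_neg (by intro h; exact hxk h.1.symm), H1 x hx, hsome]
            by_cases hlt : x < k ∧ pvGet cards x + pvGet cards b = (n : Int) + 1
            · rw [if_pos hlt, if_pos ⟨by omega, hlt.2⟩]
            · have hlt' : ¬ (x < k + 1 ∧ pvGet cards x + pvGet cards b = (n : Int) + 1) := by
                intro h; exact hlt ⟨by omega, h.2⟩
              rw [if_neg hlt, if_neg hlt']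
              rw [if_neg (by intro h; exact hxb h.1), if_neg (by intro h; exact hxb h.1)]
      · intro x hx
        rw [pvGet_set]
        simp only [L2]
        rw [H2 x hx, hsome]
        rcases eq_or_ne x b with rfl | hxb
        · simp [hb]
        · rw [if_neg (by intro h; exact hxb h.1.symm), if_neg (by intro h; exact hxb h.1),
              if_neg (by intro h; exact hxb h.1)]
    · have hnone : natMax cards ((n : Int) + 1 - pvGet cards b) (k+1)
          = natMax cards ((n : Int) + 1 - pvGet cards b) k := by
        simp only [natMax]
        rw [if_neg (by omega)]
      simp only [if_neg hm]
      refine ⟨L1, L2, ?_, ?_⟩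
      · intro x hx
        rw [H1 x hx, hnone]
        by_cases hlt : x < k + 1 ∧ pvGet cards x + pvGet cards b = (n : Int) + 1
        · have : x < k := by
            rcases Nat.lt_succ_iff_lt_or_eq.mp hlt.1 with h | rfl
            · exact h
            · exact absurd hlt.2 hm
          rw [if_pos ⟨this, hlt.2⟩, if_pos hlt]
        · rw [if_neg (by tauto), if_neg hlt]
      · intro x hx
        rw [H2 x hx, hnone]

theorem phase1_main (cards prevmax : List Int) (n : Nat)
    (hprev : ∀ b, b < n → pvGet prevmax b = omInt (natMax cards ((n : Int) + 1 - pvGet cards b) b)) :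
    ∀ m, m ≤ n → ∀ (pA cA pB cB : List Int) (d : PySem.Dict Int Int),
    pA.length = n → cA.length = n → pB.length = n → cB.length = n →
    (∀ x, m ≤ x → x < n → pvGet pA x = pvGet pB x ∧ pvGet cA x = pvGet cB x) →
    (∀ x, x < m → pvGet pA x = d.getD ((n : Int) + 1 - pvGet cards x) (-1) ∧ pvGet cA x = -1) →
    (∀ v j, d.get? v = some j → 0 ≤ j) →
    (solOuterA cards n m (pA, cA)).1 = (solPass2B cards n prevmax m (pB, cB, d)).1 ∧
    (solOuterA cards n m (pA, cA)).2 = (solPass2B cards n prevmax m (pB, cB, d)).2.1 := by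
  intro m
  induction m with
  | zero =>
    intro _ pA cA pB cB d l1 l2 l3 l4 inv1 _ _
    simp only [solOuterA, solPass2B]
    exact ⟨pvGet_eq_of_len_getD (by omega) (fun i hi => (inv1 i (by omega) (by omega)).1),
           pvGet_eq_of_len_getD (by omega) (fun i hi => (inv1 i (by omega) (by omega)).2)⟩
  | succ m ih =>
    intro hm pA cA pB cB d l1 l2 l3 l4 inv1 inv2 inv3
    have hmn : m < n := by omega
    set comp := (n : Int) + 1 - pvGet cards m with hcomp
    have hA : pvGet pA m = d.getD comp (-1) := (inv2 m (by omega)).1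
    have hAc : pvGet cA m = -1 := (inv2 m (by omega)).2
    simp only [solOuterA, solPass2B]
    by_cases hcont : d.contains comp = true
    · -- A skips, B takes the contains branch
      obtain ⟨j, hj⟩ : ∃ j, d.get? comp = some j := by
        rw [PySem.Dict.contains_eq_isSome_get?] at hcont
        exact Option.isSome_iff_exists.mp hcont
      have hj0 : 0 ≤ j := inv3 comp j hj
      have hgd : ∀ dflt : Int, d.getD comp dflt = j := fun dflt => PySem.Dict.getD_of_get?_eq_some d dflt hj
      have hAm : pvGet pA m ≠ -1 := by rw [hA, hgd]; omega
      rw [if_pos hAm, if_pos hcont]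
      refine ih (by omega) pA cA (pB.set m (d.getD comp 0)) (cB.set m (-1)) d
        l1 l2 (by simp [l3]) (by simp [l4]) ?_ (fun x hx => inv2 x (by omega)) inv3
      intro x hxm hxn
      rw [pvGet_set, pvGet_set]
      rcases eq_or_ne x m with rfl | hxne
      · rw [if_pos ⟨rfl, by omega⟩, if_pos ⟨rfl, by omega⟩, hA, hgd, hgd, hAc]
        exact ⟨rfl, rfl⟩
      · rw [if_neg (by intro h; exact hxne h.1.symm), if_neg (by intro h; exact hxne h.1.symm)]
        exact inv1 x (by omega) hxn
    · -- A runs the inner pairing loop, B inserts into minfree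
      have hnc : d.contains comp = false := by simpa using hcont
      have hgd : d.getD comp (-1) = -1 := PySem.Dict.getD_of_not_contains d (-1) hnc
      have hAm : ¬ (pvGet pA m ≠ -1) := by rw [hA, hgd]; simp
      rw [if_neg hAm, if_neg hcont]
      obtain ⟨L1, L2, H1, H2⟩ := innerA_spec cards n m hmn m (le_refl m) pA cA l1 l2
      have hpm := hprev m hmn
      refine ih (by omega)
        (solInnerA cards n m m (pA, cA)).1 (solInnerA cards n m m (pA, cA)).2
        (pB.set m (pvGet prevmax m))
        (cB.set m (if pvGet prevmax m ≠ -1 then 2 else -1))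
        (d.insert (pvGet cards m) (m : Int))
        L1 L2 (by simp [l3]) (by simp [l4]) ?_ ?_ ?_
      · -- processed region m ≤ x < n
        intro x hxm hxn
        rcases eq_or_ne x m with rfl | hxne
        · rw [pvGet_set, pvGet_set, if_pos ⟨rfl, by omega⟩, if_pos ⟨rfl, by omega⟩]
          constructor
          · rw [H1 x hxn, if_neg (by omega), hpm]
            rcases hnm : natMax cards ((n : Int) + 1 - pvGet cards x) x with _ | a
            · rw [if_neg (by simp [hnm]), hA, hgd]; rfl
            · rw [if_pos ⟨rfl, by simp [hnm]⟩]
          · rw [H2 x hxn, hpm]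
            rcases hnm : natMax cards ((n : Int) + 1 - pvGet cards x) x with _ | a
            · rw [if_neg (by simp [hnm]), hAc]; simp [omInt]
            · rw [if_pos ⟨rfl, by simp [hnm]⟩, if_pos (by simp [omInt])]
        · have hxm' : m < x := by omega
          constructor
          · rw [H1 x hxn, pvGet_set,
                if_neg (show ¬(x < m ∧ pvGet cards x + pvGet cards m = (n : Int) + 1) from
                  fun h => absurd h.1 (by omega)),
                if_neg (show ¬(x = m ∧ (natMax cards ((n : Int) + 1 - pvGet cards m) m).isSome = true) from
                  fun h => absurd h.1 (by omega)),
                if_neg (show ¬(m = x ∧ m < pB.length) from fun h => absurd h.1 (by omega))]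
            exact (inv1 x (by omega) hxn).1
          · rw [H2 x hxn, pvGet_set,
                if_neg (show ¬(x = m ∧ (natMax cards ((n : Int) + 1 - pvGet cards m) m).isSome = true) from
                  fun h => absurd h.1 (by omega)),
                if_neg (show ¬(m = x ∧ m < cB.length) from fun h => absurd h.1 (by omega))]
            exact (inv1 x (by omega) hxn).2
      · -- unprocessed region x < m
        intro x hx
        have hxn : x < n := by omega
        constructor
        · rw [H1 x hxn, PySem.Dict.getD_insert]
          by_cases hmatch : (n : Int) + 1 - pvGet cards x = pvGet cards m
          · rw [if_pos ⟨hx, by omega⟩, if_pos hmatch]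
          · rw [if_neg (by intro h; exact hmatch (by omega)),
                if_neg (by intro h; exact absurd h.1 (by omega)), if_neg hmatch]
            exact (inv2 x (by omega)).1
        · rw [H2 x hxn, if_neg (by intro h; exact absurd h.1 (by omega))]
          exact (inv2 x (by omega)).2
      · -- dict values stay nonnegative
        intro v j hv
        rw [PySem.Dict.get?_insert] at hv
        by_cases hveq : v = pvGet cards m
        · rw [if_pos hveq] at hv; cases hv; omega
        · rw [if_neg hveq] at hv; exact inv3 v j hv

theorem phase1_eq (cards : List Int) (n : Nat) (hn : n = cards.length) :
    (solOuterA cards n n (List.replicate n (-1), List.replicate n (-1))).1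
      = (solPass2B cards n (solPass1B cards n n).1 n
          (List.replicate n 0, List.replicate n 0, PySem.Dict.empty)).1 ∧
    (solOuterA cards n n (List.replicate n (-1), List.replicate n (-1))).2
      = (solPass2B cards n (solPass1B cards n n).1 n
          (List.replicate n 0, List.replicate n 0, PySem.Dict.empty)).2.1 := by
  refine phase1_main cards (solPass1B cards n n).1 n
    (fun b hb => pass1_get cards n n b hb) n (le_refl n)
    _ _ _ _ _ (by simp) (by simp) (by simp) (by simp) ?_ ?_ ?_
  · intro x h1 h2; omega
  · intro x hx
    rw [pvGet_replicate n (-1) x hx, PySem.Dict.getD_empty]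
    exact ⟨rfl, rfl⟩
  · intro v j hv
    rw [PySem.Dict.get?_empty] at hv
    cases hv

theorem disc_eq (pair : List Int) : ∀ k cost, solDiscA pair k cost = solDiscB pair k cost := by
  intro k
  induction k with
  | zero => intro cost; rfl
  | succ k ih =>
    intro cost
    simp only [solDiscA, solDiscB, ih]
    by_cases h : (k : Int) < pvGet pair k
    · rw [if_pos h, if_pos h]
    · rw [if_neg h, if_neg h]
      simp [pvGetI, pvGet]

def lexP (x y : Int × Int) : Prop := x.1 < y.1 ∨ (x.1 = y.1 ∧ x.2 < y.2)

theorem pvLexLtb_iff (x y : Int × Int) : pvLexLtb x y = true ↔ lexP x y := by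
  simp [pvLexLtb, lexP]

theorem lexP_trans {x y z : Int × Int} (h1 : lexP x y) (h2 : lexP y z) : lexP x z := by
  unfold lexP at *; omega

theorem lexP_irrefl (x : Int × Int) : ¬ lexP x x := by unfold lexP; omega

theorem lexP_asymm {x y : Int × Int} (h1 : lexP x y) : ¬ lexP y x := by
  unfold lexP at *; omega

theorem lexP_total_of_ne {x y : Int × Int} (h : x.2 ≠ y.2) : lexP x y ∨ lexP y x := by
  unfold lexP; omega

def candP (pair : List Int) (visited : List Bool) (i : Nat) : Prop :=
  visited.getD i false = false ∧ pvGet pair i ≤ (i : Int)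

def keyF (cost : List Int) (i : Nat) : Int × Int := (pvGet cost i, (i : Int))

theorem keyF_inj {cost : List Int} {i j : Nat} (h : keyF cost i = keyF cost j) : i = j := by
  have := congrArg Prod.snd h
  simp [keyF] at this
  exact this

theorem mem_insSorted (it e : Int × Int) : ∀ q, e ∈ insSorted q it ↔ e = it ∨ e ∈ q := by
  intro q
  induction q with
  | nil => simp [insSorted]
  | cons x xs ih =>
    simp only [insSorted]
    split_ifs with h
    · simp [ih]
      try tauto
    · simp
      try tauto

theorem sorted_insSorted (it : Int × Int) :
    ∀ q, q.Pairwise lexP → (∀ e ∈ q, e.2 ≠ it.2) → (insSorted q it).Pairwise lexP := by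
  intro q
  induction q with
  | nil => intro _ _; simp [insSorted]
  | cons x xs ih =>
    intro hs hf
    rcases List.pairwise_cons.mp hs with ⟨hx, hxs⟩
    simp only [insSorted]
    split_ifs with h
    · refine List.pairwise_cons.mpr ⟨?_, ih hxs (fun e he => hf e (List.mem_cons_of_mem x he))⟩
      intro e he
      rcases (mem_insSorted it e xs).mp he with rfl | he'
      · exact (pvLexLtb_iff x e).mp h
      · exact hx e he'
    · have hxi : lexP it x := by
        rcases lexP_total_of_ne (show x.2 ≠ it.2 from fun hh => hf x List.mem_cons_self hh) with h1 | h1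
        · exact absurd ((pvLexLtb_iff x it).mpr h1) h
        · exact h1
      refine List.pairwise_cons.mpr ⟨?_, hs⟩
      intro e he
      rcases List.mem_cons.mp he with rfl | he'
      · exact hxi
      · exact lexP_trans hxi (hx e he')

theorem scan_spec (pair cost : List Int) (visited : List Bool) :
    ∀ m, (solScanA pair cost visited m = -1 ∧ ∀ i, i < m → ¬ candP pair visited i)
      ∨ (∃ i : Nat, solScanA pair cost visited m = (i : Int) ∧ i < m ∧ candP pair visited i ∧
          ∀ j, j < m → candP pair visited j → j ≠ i → lexP (keyF cost i) (keyF cost j)) := by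
  intro m
  induction m with
  | zero => exact Or.inl ⟨rfl, by omega⟩
  | succ k ih =>
    simp only [solScanA]
    by_cases hc : candP pair visited k
    · rw [if_neg (by push_neg; exact ⟨by simpa [List.getD] using hc.1, hc.2⟩)]
      rcases ih with ⟨hb, hno⟩ | ⟨i, hb, hi, hci, hmin⟩
      · rw [hb, if_pos (Or.inl rfl)]
        refine Or.inr ⟨k, rfl, by omega, hc, ?_⟩
        intro j hj hcj hne
        exact absurd hcj (hno j (by omega))
      · rw [hb]
        by_cases hlt : pvGet cost k < pvGetI cost (i : Int)
        · rw [if_pos (Or.inr hlt)]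
          refine Or.inr ⟨k, rfl, by omega, hc, ?_⟩
          intro j hj hcj hnej
          have hj' : j < k := by omega
          have hki : lexP (keyF cost k) (keyF cost i) := by
            left; simpa [keyF, pvGetI_natCast] using hlt
          rcases eq_or_ne j i with rfl | hji
          · exact hki
          · exact lexP_trans hki (hmin j hj' hcj hji)
        · rw [if_neg (by push_neg; exact ⟨by omega, by rw [pvGetI_natCast] at hlt ⊢; omega⟩)]
          refine Or.inr ⟨i, rfl, by omega, hci, ?_⟩
          intro j hj hcj hnej
          rcases Nat.lt_succ_iff_lt_or_eq.mp hj with hj' | rfl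
          · exact hmin j hj' hcj hnej
          · rw [pvGetI_natCast] at hlt
            rcases eq_or_ne (pvGet cost i) (pvGet cost j) with heq | hne
            · right; exact ⟨by simpa [keyF] using heq, by simp [keyF]; omega⟩
            · left; simp only [keyF]; omega
    · have hskip : visited.getD k false = true ∨ (k : Int) < pvGet pair k := by
        unfold candP at hc
        push_neg at hc
        by_cases hv : visited.getD k false = true
        · exact Or.inl hv
        · exact Or.inr (hc (by simpa using hv))
      rw [if_pos hskip]
      rcases ih with ⟨hb, hno⟩ | ⟨i, hb, hi, hci, hmin⟩
      · refine Or.inl ⟨hb, ?_⟩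
        intro j hj
        rcases Nat.lt_succ_iff_lt_or_eq.mp hj with hj' | rfl
        · exact hno j hj'
        · exact hc
      · refine Or.inr ⟨i, hb, by omega, hci, ?_⟩
        intro j hj hcj hnej
        rcases Nat.lt_succ_iff_lt_or_eq.mp hj with hj' | rfl
        · exact hmin j hj' hcj hnej
        · exact absurd hcj hc

theorem push_spec (pair cost : List Int) (visited : List Bool) :
    ∀ k pushed (q : List (Int × Int)),
    q.Pairwise lexP →
    (∀ e, e ∈ q ↔ ∃ i : Nat, i < pushed ∧ candP pair visited i ∧ e = keyF cost i) →
    (∀ i : Nat, pushed ≤ i → i < pushed + k → visited.getD i false = false) →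
    (solPushB pair cost k pushed q).2 = pushed + k ∧
    (solPushB pair cost k pushed q).1.Pairwise lexP ∧
    (∀ e, e ∈ (solPushB pair cost k pushed q).1 ↔
      ∃ i : Nat, i < pushed + k ∧ candP pair visited i ∧ e = keyF cost i) := by
  intro k
  induction k with
  | zero => intro pushed q hs hiff _; exact ⟨rfl, hs, hiff⟩
  | succ k ih =>
    intro pushed q hs hiff hvis
    simp only [solPushB]
    by_cases hp : pvGet pair pushed ≤ (pushed : Int)
    · rw [if_pos hp, show (pvGet cost pushed, (pushed : Int)) = keyF cost pushed from rfl]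
      have hcand : candP pair visited pushed := ⟨hvis pushed (le_refl _) (by omega), hp⟩
      have hfresh : ∀ e ∈ q, e.2 ≠ (keyF cost pushed).2 := by
        intro e he
        obtain ⟨i, hi, _, rfl⟩ := (hiff e).mp he
        simp only [keyF]
        intro hcast
        have : i = pushed := by exact_mod_cast hcast
        omega
      have hs' : (insSorted q (keyF cost pushed)).Pairwise lexP := sorted_insSorted _ q hs hfresh
      have hiff' : ∀ e, e ∈ insSorted q (keyF cost pushed) ↔
          ∃ i : Nat, i < pushed + 1 ∧ candP pair visited i ∧ e = keyF cost i := by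
        intro e
        rw [mem_insSorted, hiff]
        constructor
        · rintro (rfl | ⟨i, hi, hc, rfl⟩)
          · exact ⟨pushed, by omega, hcand, rfl⟩
          · exact ⟨i, by omega, hc, rfl⟩
        · rintro ⟨i, hi, hc, rfl⟩
          rcases Nat.lt_succ_iff_lt_or_eq.mp hi with hi' | rfl
          · exact Or.inr ⟨i, hi', hc, rfl⟩
          · exact Or.inl rfl
      have := ih (pushed + 1) (insSorted q (keyF cost pushed)) hs' hiff'
        (fun i h1 h2 => hvis i (by omega) (by omega))
      refine ⟨by rw [this.1]; omega, this.2.1, ?_⟩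
      intro e
      rw [(this.2.2 e)]
      constructor
      · rintro ⟨i, hi, hc, rfl⟩; exact ⟨i, by omega, hc, rfl⟩
      · rintro ⟨i, hi, hc, rfl⟩; exact ⟨i, by omega, hc, rfl⟩
    · rw [if_neg hp]
      have hiff' : ∀ e, e ∈ q ↔
          ∃ i : Nat, i < pushed + 1 ∧ candP pair visited i ∧ e = keyF cost i := by
        intro e
        rw [hiff]
        constructor
        · rintro ⟨i, hi, hc, rfl⟩; exact ⟨i, by omega, hc, rfl⟩
        · rintro ⟨i, hi, hc, rfl⟩
          rcases Nat.lt_succ_iff_lt_or_eq.mp hi with hi' | rfl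
          · exact ⟨i, hi', hc, rfl⟩
          · exact absurd hc.2 hp
      have := ih (pushed + 1) q hs hiff' (fun i h1 h2 => hvis i (by omega) (by omega))
      refine ⟨by rw [this.1]; omega, this.2.1, ?_⟩
      intro e
      rw [(this.2.2 e)]
      constructor
      · rintro ⟨i, hi, hc, rfl⟩; exact ⟨i, by omega, hc, rfl⟩
      · rintro ⟨i, hi, hc, rfl⟩; exact ⟨i, by omega, hc, rfl⟩

theorem visGet_set (xs : List Bool) (i j : Nat) (v : Bool) :
    (xs.set i v).getD j false = if i = j ∧ i < xs.length then v else xs.getD j false := by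
  simp [List.getD, List.getElem?_set]
  split_ifs with h1 h2 h3 <;> simp_all <;> omega

theorem loop_eq (n3 : Int) (hn3 : 0 ≤ n3) (n : Nat) (pair cost : List Int) :
    ∀ fuel (coin : Int) (visited : List Bool) (q : List (Int × Int)) (pushed : Nat) (pc : Int),
    visited.length = n →
    0 ≤ pc →
    (pushed : Int) ≤ min (n3 + 2 * (pc + 1) - 1) ((n : Int) - 1) + 1 →
    (∀ i : Nat, pushed ≤ i → visited.getD i false = false) →
    q.Pairwise lexP →
    (∀ e, e ∈ q ↔ ∃ i : Nat, i < pushed ∧ candP pair visited i ∧ e = keyF cost i) →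
    solLoopA n3 (n : Int) pair cost fuel coin visited pc
      = solLoopB n3 (n : Int) pair cost fuel coin q pushed pc := by
  intro fuel
  induction fuel with
  | zero => intros; rfl
  | succ fuel ih =>
    intro coin visited q pushed pc hlen hpc hpush hvis hsort hiff
    simp only [solLoopA, solLoopB]
    by_cases hcoin : coin < 0
    · rw [if_pos hcoin, if_pos hcoin]
    · rw [if_neg hcoin, if_neg hcoin]
      have hge : -1 ≤ min (n3 + 2 * (pc + 1) - 1) ((n : Int) - 1) := by omega
      set hi := min (n3 + 2 * (pc + 1) - 1) ((n : Int) - 1) with hhi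
      obtain ⟨hp2, hsort', hiff'⟩ := push_spec pair cost visited ((hi + 1 - (pushed : Int)).toNat)
        pushed q hsort hiff (fun i h1 _ => hvis i h1)
      have hpushed' : (solPushB pair cost ((hi + 1 - (pushed : Int)).toNat) pushed q).2
          = (hi + 1).toNat := by rw [hp2]; omega
      have hm : pushed + (hi + 1 - (pushed : Int)).toNat = (hi + 1).toNat := by omega
      rw [hm] at hiff'
      have hmn : (hi + 1).toNat ≤ n := by omega
      rcases scan_spec pair cost visited ((hi + 1).toNat) with ⟨hb, hno⟩ | ⟨i, hb, hi_, hci, hmin⟩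
      · -- no candidate: A breaks with -1, B's queue is empty
        have hqnil : (solPushB pair cost ((hi + 1 - (pushed : Int)).toNat) pushed q).1 = [] := by
          cases hq : (solPushB pair cost ((hi + 1 - (pushed : Int)).toNat) pushed q).1 with
          | nil => rfl
          | cons hd tl =>
            obtain ⟨i, hi_, hc, _⟩ := (hiff' hd).mp (by rw [hq]; exact List.mem_cons_self)
            exact absurd hc (hno i hi_)
        rw [hb, if_pos (Or.inl rfl), hqnil, if_pos rfl]
      · -- candidate i is both A's scan result and the head of B's queue
        have hmem : keyF cost i ∈ (solPushB pair cost ((hi + 1 - (pushed : Int)).toNat) pushed q).1 :=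
          (hiff' _).mpr ⟨i, hi_, hci, rfl⟩
        cases hq : (solPushB pair cost ((hi + 1 - (pushed : Int)).toNat) pushed q).1 with
        | nil => rw [hq] at hmem; cases hmem
        | cons hd rest =>
          rw [hq] at hmem hiff' hsort'
          rcases List.pairwise_cons.mp hsort' with ⟨hhd, hrest⟩
          obtain ⟨i0, hi0, hci0, hdkey⟩ := (hiff' hd).mp List.mem_cons_self
          have hhd_eq : hd = keyF cost i := by
            rcases eq_or_ne i0 i with rfl | hne
            · exact hdkey
            · exfalso
              rcases List.mem_cons.mp hmem with heq | hin
              · exact hne (keyF_inj (heq.trans hdkey)).symm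
              · exact lexP_asymm (hhd _ hin) (hdkey ▸ hmin i0 hi0 hci0 hne)
          have hd1 : (hd.1 : Int) = pvGet cost i := by rw [hhd_eq]; rfl
          rw [hb]
          simp only [List.headD_cons, List.tail_cons, reduceCtorEq, if_false]
          rw [hd1, pvGetI_natCast, Int.toNat_natCast, hpushed']
          by_cases hstop : coin - pvGet cost i < 0
          · rw [if_pos (Or.inr hstop), if_pos hstop]
          · simp only [false_or]
            rw [if_neg hstop, if_neg hstop]
            have hilen : i < visited.length := by omega
            refine ih (coin - pvGet cost i) (visited.set i true) rest ((hi + 1).toNat) (pc + 1)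
              (by simp [hlen]) (by omega)
              (by have h1 : hi ≤ n3 + 2 * (pc + 1) - 1 := by rw [hhi]; omega
                  have h2 : hi ≤ (n : Int) - 1 := by rw [hhi]; omega
                  push_cast; omega) ?_ hrest ?_
            · intro j hj
              rw [visGet_set, if_neg (by intro h; omega)]
              exact hvis j (by omega)
            · intro e
              constructor
              · intro he
                obtain ⟨i1, hi1, hc1, rfl⟩ := (hiff' e).mp (List.mem_cons_of_mem _ he)
                have hne1 : i1 ≠ i := by
                  intro h
                  subst h
                  exact lexP_irrefl _ (hhd _ (hhd_eq ▸ he))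
                refine ⟨i1, hi1, ⟨?_, hc1.2⟩, rfl⟩
                rw [visGet_set, if_neg (by intro h; omega)]
                exact hc1.1
              · rintro ⟨i1, hi1, hc1, rfl⟩
                have hne1 : i1 ≠ i := by
                  intro h
                  subst h
                  have := hc1.1
                  rw [visGet_set, if_pos ⟨rfl, hilen⟩] at this
                  cases this
                have hc1' : candP pair visited i1 := by
                  refine ⟨?_, hc1.2⟩
                  have := hc1.1
                  rwa [visGet_set, if_neg (by intro h; omega)] at this
                have : keyF cost i1 ∈ hd :: rest := (hiff' _).mpr ⟨i1, hi1, hc1', rfl⟩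
                rcases List.mem_cons.mp this with heq | hin
                · exact absurd (keyF_inj (heq.trans hhd_eq)) hne1
                · exact hin

theorem getD_replicate_false (n i : Nat) : (List.replicate n false).getD i false = false := by
  simp [List.getD, List.getElem?_replicate]
  split_ifs <;> simp

theorem sol_eq (coin : Int) (cards : List Int) : solution coin cards = solution_alt coin cards := by
  simp only [solution, solution_alt]
  obtain ⟨h1, h2⟩ := phase1_eq cards cards.length rfl
  rw [← h1, ← h2, ← disc_eq]
  rw [loop_eq ((cards.length / 3 : Nat) : Int) (by positivity) cards.length
        (solOuterA cards cards.length cards.length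
          (List.replicate cards.length (-1), List.replicate cards.length (-1))).1
        (solDiscA (solOuterA cards cards.length cards.length
          (List.replicate cards.length (-1), List.replicate cards.length (-1))).1
          (cards.length / 3)
          (solOuterA cards cards.length cards.length
            (List.replicate cards.length (-1), List.replicate cards.length (-1))).2)
        (cards.length + 1) coin (List.replicate cards.length false) [] 0 0
        (by simp) (le_refl 0) (by omega) (fun i _ => getD_replicate_false _ i)
        List.Pairwise.nil (fun e => by simp)]

-- ===== VERDICT (by name: the statement is the Claim_ definition above) =====
theorem solution_spec : Claim_equal_solution := by
  intro coin cards _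
  unfold Spec_solution
  exact sol_eq coin cards
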